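-- pv_equiv track=rewrite | github.com/eldarrello/aoc | 2016/11/solution.py | check_fry
-- ===== SOURCE A (Python) =====
-- def check_fry(floor):
--     gs = []
--     ms = []
--     for i in floor:
--         type = i[-1:]
--         name = i[:-1]
--         if type == 'G':
--             gs.append(name)
--         else:
--             ms.append(name)
--     if not gs: return False
--     for i in ms:
--         if i not in gs:
--             return True
-- ===== SOURCE B (Python) =====
-- def check_fry(floor):
--     # Single pass: merge every item into a name -> (has_generator, has_chip) table,
--     # then answer from two aggregate scans over the table's values.
--     seen = {}
--     for item in floor:
--         name = item[:-1]
--         is_gen = item[-1:] == 'G'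
--         g, m = seen.get(name, (False, False))
--         seen[name] = (g or is_gen, m or not is_gen)
--     if not any(g for g, _ in seen.values()):
--         return False
--     if any(m and not g for g, m in seen.values()):
--         return True
-- ===== Notes on version B (the rewrite author's own statement) =====
-- stated objective: alternative
-- what changed: Instead of accumulating two name lists and scanning each chip name against the generator list, B makes one pass merging every item into a name -> (has_generator, has_chip) dictionary and answers with two aggregate scans over its values (no membership test against a collection of names remains).
import Mathlib
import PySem

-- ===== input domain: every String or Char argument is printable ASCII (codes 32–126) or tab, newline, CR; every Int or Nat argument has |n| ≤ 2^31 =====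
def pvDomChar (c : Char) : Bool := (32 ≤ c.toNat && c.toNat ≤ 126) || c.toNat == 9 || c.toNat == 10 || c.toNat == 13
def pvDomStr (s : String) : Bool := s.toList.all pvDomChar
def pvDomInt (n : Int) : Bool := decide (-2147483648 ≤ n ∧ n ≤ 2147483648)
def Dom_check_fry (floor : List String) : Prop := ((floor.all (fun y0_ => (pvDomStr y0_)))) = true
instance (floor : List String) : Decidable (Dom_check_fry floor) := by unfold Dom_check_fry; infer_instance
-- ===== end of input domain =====

-- B: one pass building a name -> (has_generator, has_chip) dictionary, then two aggregate
-- scans over its values (alternative decomposition; same behaviour, incl. implicit None).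

-- ===== PORT A =====
-- second loop of A: 'for i in ms: if i not in gs: return True' (falls off the end → None)
def checkFryScan (ms gs : List String) : Option Bool :=
  match ms with
  | [] => none
  | i :: rest => if i ∈ gs then checkFryScan rest gs else some true

def check_fry (floor : List String) : Option Bool :=
  let p := floor.foldl (fun (p : List String × List String) i =>
    let ty := PySem.Str.slice i (some (-1)) none
    let name := PySem.Str.slice i none (some (-1))
    if ty = "G" then (p.1 ++ [name], p.2) else (p.1, p.2 ++ [name])) ([], [])
  if p.1 = [] then some false
  else checkFryScan p.2 p.1

-- ===== PORT B =====
def check_fry_alt (floor : List String) : Option Bool :=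
  let seen : PySem.Dict String (Bool × Bool) := floor.foldl (fun d item =>
    let name := PySem.Str.slice item none (some (-1))
    let is_gen := PySem.Str.slice item (some (-1)) none == "G"
    let p := d.getD name (false, false)
    d.insert name (p.1 || is_gen, p.2 || !is_gen)) PySem.Dict.empty
  if ¬ (seen.values.any (fun p => p.1)) = true then some false
  else if (seen.values.any (fun p => p.2 && !p.1)) = true then some true
  else none

-- ===== PRECONDITION & SPEC =====
def Spec_check_fry (floor : List String) (out : Option Bool) : Prop := out = check_fry_alt floor
instance (floor : List String) (out : Option Bool) : Decidable (Spec_check_fry floor out) := by unfold Spec_check_fry; infer_instance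

-- ===== CLAIM (what is proved, stated in full; the proofs are below) =====
def Claim_equal_check_fry : Prop := ∀ (floor : List String), Dom_check_fry floor → Spec_check_fry floor (check_fry floor)

-- ===== LEMMAS AND PROOFS =====

-- the name part of an item, whether it is a generator, and the two name lists
def fryNm (x : String) : String := PySem.Str.slice x none (some (-1))
def fryIsG (x : String) : Bool := PySem.Str.slice x (some (-1)) none == "G"
def fryGenN (floor : List String) : List String := (floor.filter (fun x => fryIsG x)).map fryNm
def fryChipN (floor : List String) : List String := (floor.filter (fun x => ¬ fryIsG x = true)).map fryNm

theorem fryGenN_cons (i : String) (rest : List String) :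
    fryGenN (i :: rest) = if fryIsG i then fryNm i :: fryGenN rest else fryGenN rest := by
  cases hg : fryIsG i <;> simp [fryGenN, List.filter_cons, hg]

theorem fryChipN_cons (i : String) (rest : List String) :
    fryChipN (i :: rest) = if fryIsG i then fryChipN rest else fryNm i :: fryChipN rest := by
  cases hg : fryIsG i <;> simp [fryChipN, List.filter_cons, hg]

theorem checkFry_foldl (floor : List String) (gs ms : List String) :
    floor.foldl (fun (p : List String × List String) i =>
      let ty := PySem.Str.slice i (some (-1)) none
      let name := PySem.Str.slice i none (some (-1))
      if ty = "G" then (p.1 ++ [name], p.2) else (p.1, p.2 ++ [name])) (gs, ms) =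
    (gs ++ fryGenN floor, ms ++ fryChipN floor) := by
  induction floor generalizing gs ms with
  | nil => simp [fryGenN, fryChipN]
  | cons i rest ih =>
    simp only [List.foldl_cons, fryGenN_cons, fryChipN_cons]
    by_cases h : PySem.Str.slice i (some (-1)) none = "G" <;>
      simp [h, ih, fryIsG, fryNm]

theorem checkFryScan_eq (ms gs : List String) :
    checkFryScan ms gs = if ∀ i ∈ ms, i ∈ gs then none else some true := by
  induction ms with
  | nil => simp [checkFryScan]
  | cons i rest ih =>
    by_cases h : i ∈ gs
    · simp [checkFryScan, h, ih]
    · simp [checkFryScan, h]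

-- the dictionary built by B's loop, from an arbitrary start dictionary (defeq to B's foldl)
def fryBuild (floor : List String) (d : PySem.Dict String (Bool × Bool)) :
    PySem.Dict String (Bool × Bool) :=
  floor.foldl (fun d item =>
    let p := d.getD (fryNm item) (false, false)
    d.insert (fryNm item) (p.1 || fryIsG item, p.2 || !fryIsG item)) d

theorem fryBuild_getD (floor : List String) (d : PySem.Dict String (Bool × Bool)) (k : String) :
    (fryBuild floor d).getD k (false, false) =
      ((d.getD k (false, false)).1 || decide (k ∈ fryGenN floor),
       (d.getD k (false, false)).2 || decide (k ∈ fryChipN floor)) := by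
  induction floor generalizing d with
  | nil => simp [fryBuild, fryGenN, fryChipN]
  | cons i rest ih =>
    simp only [fryBuild, List.foldl_cons] at ih ⊢
    rw [ih, PySem.Dict.getD_insert, fryGenN_cons, fryChipN_cons]
    by_cases hk : k = fryNm i <;> cases hg : fryIsG i <;>
      simp [hk, hg, Bool.or_assoc, Bool.or_comm, Bool.or_left_comm]

theorem fryBuild_keys (floor : List String) :
    (fryBuild floor PySem.Dict.empty).keys = PySem.Set.ofList (floor.map fryNm) := by
  simp only [fryBuild]
  rw [PySem.Dict.keys_foldl_insert_key]
  simp [PySem.Set.update, PySem.Set.ofList_eq_foldl]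

theorem fryBuild_nodup (floor : List String) :
    (fryBuild floor PySem.Dict.empty).keys.Nodup := by
  simp only [fryBuild]
  exact PySem.Dict.nodup_keys_foldl_insert_key _ _ _ _ PySem.Dict.nodup_keys_empty

theorem genN_sub_names (floor : List String) : ∀ k ∈ fryGenN floor, k ∈ floor.map fryNm := by
  intro k hk
  simp only [fryGenN, List.mem_map] at hk
  obtain ⟨x, hx, rfl⟩ := hk
  exact List.mem_map_of_mem (List.mem_of_mem_filter hx)

theorem chipN_sub_names (floor : List String) : ∀ k ∈ fryChipN floor, k ∈ floor.map fryNm := by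
  intro k hk
  simp only [fryChipN, List.mem_map] at hk
  obtain ⟨x, hx, rfl⟩ := hk
  exact List.mem_map_of_mem (List.mem_of_mem_filter hx)

-- ===== VERDICT (by name: the statement is the Claim_ definition above) =====
theorem check_fry_spec : Claim_equal_check_fry := by
  intro floor _
  unfold Spec_check_fry check_fry check_fry_alt
  rw [checkFry_foldl]
  simp only [List.nil_append]
  have hb : (floor.foldl (fun d item =>
      let name := PySem.Str.slice item none (some (-1))
      let is_gen := PySem.Str.slice item (some (-1)) none == "G"
      let p := d.getD name (false, false)
      d.insert name (p.1 || is_gen, p.2 || !is_gen)) PySem.Dict.empty) =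
      fryBuild floor PySem.Dict.empty := rfl
  rw [hb]
  have hvals : (fryBuild floor PySem.Dict.empty).values =
      (PySem.Set.ofList (floor.map fryNm)).map
        (fun k => (decide (k ∈ fryGenN floor), decide (k ∈ fryChipN floor))) := by
    rw [PySem.Dict.values_eq_map_keys _ (fryBuild_nodup floor) (false, false), fryBuild_keys]
    refine List.map_congr_left (fun k _ => ?_)
    rw [fryBuild_getD]; simp
  rw [hvals, checkFryScan_eq]
  have hany1 : (((PySem.Set.ofList (floor.map fryNm)).map
      (fun k => (decide (k ∈ fryGenN floor), decide (k ∈ fryChipN floor)))).any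
      (fun p => p.1)) = true ↔ ¬ fryGenN floor = [] := by
    simp only [List.any_map, List.any_eq_true, Function.comp_def, PySem.Set.mem_ofList,
      decide_eq_true_eq]
    constructor
    · rintro ⟨k, _, hk⟩ h; simp [h] at hk
    · intro h
      obtain ⟨k, hk⟩ := List.exists_mem_of_ne_nil _ h
      exact ⟨k, genN_sub_names floor k hk, hk⟩
  have hany2 : (((PySem.Set.ofList (floor.map fryNm)).map
      (fun k => (decide (k ∈ fryGenN floor), decide (k ∈ fryChipN floor)))).any
      (fun p => p.2 && !p.1)) = true ↔ ¬ ∀ i ∈ fryChipN floor, i ∈ fryGenN floor := by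
    simp only [List.any_map, List.any_eq_true, Function.comp_def, PySem.Set.mem_ofList,
      Bool.and_eq_true, Bool.not_eq_eq_eq_not, Bool.not_true, decide_eq_true_eq,
      decide_eq_false_iff_not, not_forall]
    constructor
    · rintro ⟨k, _, hc, hg⟩; exact ⟨k, hc, hg⟩
    · rintro ⟨k, hc, hg⟩; exact ⟨k, chipN_sub_names floor k hc, hc, hg⟩
  simp only [hany1, hany2, not_not]
  by_cases hg : fryGenN floor = []
  · simp [hg]
  · by_cases hall : ∀ i ∈ fryChipN floor, i ∈ fryGenN floor
    · rw [if_neg hg, if_pos hall, if_neg hg, if_neg]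
      exact fun h => h hall
    · simp [hg, hall]
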